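-- pv_equiv track=rewrite | github.com/KasraKnanosys/2D-GBUILD | Polycrystal/Codes/NNFind_3.py | share_edge
-- ===== SOURCE A (Python) =====
-- def share_edge(polygon1, polygon2):
--     for i in range(len(polygon1)):
--         edge1 = {polygon1[i], polygon1[(i + 1) % len(polygon1)]}
--         for j in range(len(polygon2)):
--             edge2 = {polygon2[j], polygon2[(j + 1) % len(polygon2)]}
--             if edge1 == edge2:
--                 return edge1
--     return None
-- ===== SOURCE B (Python) =====
-- def share_edge(polygon1, polygon2):
--     n2 = len(polygon2)
--     keys2 = {frozenset((polygon2[j], polygon2[(j + 1) % n2])) for j in range(n2)}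
--     n1 = len(polygon1)
--     for i in range(n1):
--         a = polygon1[i]
--         b = polygon1[(i + 1) % n1]
--         if frozenset((a, b)) in keys2:
--             return {a, b}
--     return None
-- ===== Notes on version B (the rewrite author's own statement) =====
-- stated objective: faster
-- what changed: Builds a hash set of polygon2's edges (as frozensets) once, then makes a single pass over polygon1's edges testing membership, replacing the nested polygon1-by-polygon2 scan.
import Mathlib
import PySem

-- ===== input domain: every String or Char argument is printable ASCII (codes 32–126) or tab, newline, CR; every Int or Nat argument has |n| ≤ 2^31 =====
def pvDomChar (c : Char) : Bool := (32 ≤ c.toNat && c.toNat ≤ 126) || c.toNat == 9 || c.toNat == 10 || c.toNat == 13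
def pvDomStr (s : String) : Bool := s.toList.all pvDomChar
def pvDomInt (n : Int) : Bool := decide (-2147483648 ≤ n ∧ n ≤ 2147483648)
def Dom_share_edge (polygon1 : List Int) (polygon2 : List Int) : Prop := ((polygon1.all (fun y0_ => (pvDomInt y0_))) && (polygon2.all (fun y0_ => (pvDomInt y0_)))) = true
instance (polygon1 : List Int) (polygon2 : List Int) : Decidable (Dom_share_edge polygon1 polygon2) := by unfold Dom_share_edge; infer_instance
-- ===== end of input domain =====

-- B replaces A's nested scan by a set of polygon2's edges built once plus a single pass over polygon1 (faster, asymptotic in a timing run).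

-- ===== PORT A =====
-- edge i of polygon p: the Python set {p[i], p[(i+1) % len(p)]} (indices produced by range are in bounds, so getD is exact)
def pvEdgeA (p : List Int) (i : Nat) : PySem.Set Int :=
  PySem.Set.ofList [p.getD i 0, p.getD ((i + 1) % p.length) 0]

-- inner 'for j in range(len(polygon2))' loop
def pvInnerA (e1 : PySem.Set Int) (p2 : List Int) : List Nat → Option (List Int)
  | [] => none
  | j :: js => if PySem.Set.equal e1 (pvEdgeA p2 j) then some e1 else pvInnerA e1 p2 js

-- outer 'for i in range(len(polygon1))' loop
def pvOuterA (p1 p2 : List Int) : List Nat → Option (List Int)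
  | [] => none
  | i :: is =>
    match pvInnerA (pvEdgeA p1 i) p2 (List.range p2.length) with
    | some e => some e
    | none => pvOuterA p1 p2 is

def share_edge (polygon1 : List Int) (polygon2 : List Int) : Option (List Int) :=
  pvOuterA polygon1 polygon2 (List.range polygon1.length)

-- ===== PORT B =====
-- Source B's frozenset of a two-element edge, encoded canonically as the sorted pair (exact: two frozensets are equal iff the sorted pairs are)
def pvKeyB (p : List Int) (i : Nat) : Int × Int :=
  let a := p.getD i 0
  let b := p.getD ((i + 1) % p.length) 0
  (min a b, max a b)

-- the single pass 'for i in range(n1)' with membership in the prebuilt key set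
def pvScanB (p1 : List Int) (keys2 : PySem.Set (Int × Int)) : List Nat → Option (List Int)
  | [] => none
  | i :: is =>
    if PySem.Set.contains keys2 (pvKeyB p1 i) then
      some (PySem.Set.ofList [p1.getD i 0, p1.getD ((i + 1) % p1.length) 0])
    else pvScanB p1 keys2 is

def share_edge_alt (polygon1 : List Int) (polygon2 : List Int) : Option (List Int) :=
  pvScanB polygon1
    (PySem.Set.ofList ((List.range polygon2.length).map (pvKeyB polygon2)))
    (List.range polygon1.length)

-- ===== PRECONDITION & SPEC =====
def Spec_share_edge (polygon1 : List Int) (polygon2 : List Int) (out : Option (List Int)) : Prop := out = share_edge_alt polygon1 polygon2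
instance (polygon1 : List Int) (polygon2 : List Int) (out : Option (List Int)) : Decidable (Spec_share_edge polygon1 polygon2 out) := by unfold Spec_share_edge; infer_instance

-- ===== CLAIM (what is proved, stated in full; the proofs are below) =====
def Claim_equal_share_edge : Prop := ∀ (polygon1 : List Int) (polygon2 : List Int), Dom_share_edge polygon1 polygon2 → Spec_share_edge polygon1 polygon2 (share_edge polygon1 polygon2)

-- ===== LEMMAS AND PROOFS =====

-- two-element Python sets are equal iff their (min, max) keys are equal
theorem pv_equal_iff_key (a b c d : Int) :
    PySem.Set.equal (PySem.Set.ofList [a, b]) (PySem.Set.ofList [c, d]) = true ↔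
      (min c d, max c d) = (min a b, max a b) := by
  rw [PySem.Set.equal_iff]
  constructor
  · intro h
    have ha := (h a).symm; have hb := (h b).symm; have hc := h c; have hd := h d
    simp [PySem.Set.mem_ofList] at ha hb hc hd
    refine Prod.ext ?_ ?_ <;> simp <;> omega
  · intro h x
    have h1 := congrArg Prod.fst h
    have h2 := congrArg Prod.snd h
    simp at h1 h2
    simp [PySem.Set.mem_ofList]
    omega

theorem pv_edgeA_equal (p1 p2 : List Int) (i j : Nat) :
    PySem.Set.equal (pvEdgeA p1 i) (pvEdgeA p2 j) = true ↔ pvKeyB p2 j = pvKeyB p1 i := by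
  simp only [pvEdgeA, pvKeyB]
  exact pv_equal_iff_key _ _ _ _

theorem pv_inner_eq (p1 p2 : List Int) (i : Nat) (js : List Nat) :
    pvInnerA (pvEdgeA p1 i) p2 js =
      if ∃ j ∈ js, pvKeyB p2 j = pvKeyB p1 i then some (pvEdgeA p1 i) else none := by
  induction js with
  | nil => simp [pvInnerA]
  | cons j js ih =>
    simp only [pvInnerA, ih]
    by_cases hk : pvKeyB p2 j = pvKeyB p1 i
    · rw [if_pos ((pv_edgeA_equal p1 p2 i j).mpr hk)]
      simp [hk]
    · rw [if_neg (mt (pv_edgeA_equal p1 p2 i j).mp hk)]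
      by_cases he : ∃ j' ∈ js, pvKeyB p2 j' = pvKeyB p1 i
      · simp [he, hk]
      · simp [he, hk]

theorem pv_contains_iff (p1 p2 : List Int) (i : Nat) :
    PySem.Set.contains (PySem.Set.ofList ((List.range p2.length).map (pvKeyB p2))) (pvKeyB p1 i) = true ↔
      ∃ j ∈ List.range p2.length, pvKeyB p2 j = pvKeyB p1 i := by
  rw [PySem.Set.contains_iff, PySem.Set.mem_ofList]
  simp [eq_comm]

theorem pv_loops_eq (p1 p2 : List Int) (is : List Nat) :
    pvOuterA p1 p2 is =
      pvScanB p1 (PySem.Set.ofList ((List.range p2.length).map (pvKeyB p2))) is := by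
  induction is with
  | nil => rfl
  | cons i is ih =>
    simp only [pvOuterA, pvScanB, pv_inner_eq]
    by_cases h : ∃ j ∈ List.range p2.length, pvKeyB p2 j = pvKeyB p1 i
    · rw [if_pos h, if_pos ((pv_contains_iff p1 p2 i).mpr h)]
      rfl
    · rw [if_neg h, if_neg (by simpa [pv_contains_iff] using h)]
      exact ih

-- ===== VERDICT (by name: the statement is the Claim_ definition above) =====
theorem share_edge_spec : Claim_equal_share_edge := by
  intro p1 p2 _
  unfold Spec_share_edge share_edge share_edge_alt
  exact pv_loops_eq p1 p2 (List.range p1.length)
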